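-- pv_equiv track=rewrite | github.com/raechelt/TimesVector | bin/mutual_rank.py | discretize_values
-- ===== SOURCE A (Python) =====
-- def discretize_values(values, bin_num):
-- 	sorted_vals = sorted(values)
-- 	length = len(sorted_vals)
-- 	bin_edges = []
-- 	for i in range(bin_num):
-- 		bin_edges.append(sorted_vals[length * i // bin_num])
-- 	bin_edges.append(float('inf'))
-- 	ranks = []
-- 	for val in values:
-- 		for i in range(bin_num):
-- 			if bin_edges[i] <= val and val < bin_edges[i+1]:
-- 				ranks.append(i)
-- 				break
-- 	return ranks
-- ===== SOURCE B (Python) =====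
-- def _bisect_right(a, x):
--     # hand-written bisect_right (A's module imports nothing, so no bisect import)
--     lo, hi = 0, len(a)
--     while lo < hi:
--         mid = (lo + hi) // 2
--         if x < a[mid]:
--             hi = mid
--         else:
--             lo = mid + 1
--     return lo
--
--
-- def discretize_values(values, bin_num):
--     if bin_num < 1:
--         return []
--     sorted_vals = sorted(values)
--     n = len(sorted_vals)
--     bin_edges = [sorted_vals[n * i // bin_num] for i in range(bin_num)]
--     return [_bisect_right(bin_edges, v) - 1 for v in values]
-- ===== Notes on version B (the rewrite author's own statement) =====
-- stated objective: faster
-- what changed: B replaces A's per-value linear scan over the bin_num bins (with the float('inf') sentinel edge) by a hand-written bisect_right binary search over the precomputed sorted bin edges, returning bisect_right(edges, v) - 1, and builds the edge list as a comprehension.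
import Mathlib
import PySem

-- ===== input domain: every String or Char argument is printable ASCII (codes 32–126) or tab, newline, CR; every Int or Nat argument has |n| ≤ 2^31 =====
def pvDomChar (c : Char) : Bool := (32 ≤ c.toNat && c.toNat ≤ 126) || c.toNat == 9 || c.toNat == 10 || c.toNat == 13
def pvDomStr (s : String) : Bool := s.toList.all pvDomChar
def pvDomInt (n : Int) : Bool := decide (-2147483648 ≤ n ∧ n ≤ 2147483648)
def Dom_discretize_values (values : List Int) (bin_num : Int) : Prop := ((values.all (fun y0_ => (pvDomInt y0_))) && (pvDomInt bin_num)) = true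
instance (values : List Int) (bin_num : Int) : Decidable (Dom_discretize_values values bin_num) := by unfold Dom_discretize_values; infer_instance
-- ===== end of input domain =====

-- B replaces A's inner linear scan over the bins by a binary search (bisect_right - 1)
-- over the precomputed bin edges; equivalence of the return values is proved on Pre_.

-- ===== PORT A =====
-- A's inner loop: 'for i in range(bin_num): if bin_edges[i] <= val and val < bin_edges[i+1]: append i; break'.
-- The trailing float('inf') edge is not an Int; it is encoded structurally: on the last real edge
-- the upper test 'val < inf' is always true.  Returns the appended rank, none if no bin matched.
def pvScanA : List Int → Int → Int → Option Int
  | [], _, _ => none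
  | [e], i, v => if e ≤ v then some i else none
  | e :: e' :: rest, i, v =>
      if e ≤ v ∧ v < e' then some i else pvScanA (e' :: rest) (i + 1) v

def discretize_values (values : List Int) (bin_num : Int) : List Int :=
  let sorted_vals := PySem.List.sorted values (fun x => x)
  let length : Int := sorted_vals.length
  -- sorted_vals[length * i // bin_num]: Pre_ guarantees the index is in range (pyGetD's side condition)
  let bin_edges := (PySem.List.pyRange 0 bin_num 1).foldl
    (fun acc i => acc ++ [PySem.List.pyGetD sorted_vals (PySem.Int.floordiv (length * i) bin_num) 0]) []
  values.foldl (fun ranks val =>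
    match pvScanA bin_edges 0 val with
    | some r => ranks ++ [r]
    | none => ranks) []

-- ===== PORT B =====
-- Source B's hand-written _bisect_right is CPython's bisect.bisect_right; ported as the prelude's primitive.
def discretize_values_alt (values : List Int) (bin_num : Int) : List Int :=
  if bin_num < 1 then []
  else
    let sorted_vals := PySem.List.sorted values (fun x => x)
    let n : Int := sorted_vals.length
    let bin_edges := (PySem.List.pyRange 0 bin_num 1).map
      (fun i => PySem.List.pyGetD sorted_vals (PySem.Int.floordiv (n * i) bin_num) 0)
    values.map (fun v => (PySem.List.bisectRight bin_edges v : Int) - 1)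

-- ===== PRECONDITION & SPEC =====
-- A raises IndexError (sorted_vals[0] on an empty list) exactly when values = [] and bin_num ≥ 1;
-- those inputs are excluded, nothing else is.
def Pre_discretize_values (values : List Int) (bin_num : Int) : Prop :=
  values ≠ [] ∨ bin_num < 1
instance (values : List Int) (bin_num : Int) : Decidable (Pre_discretize_values values bin_num) := by
  unfold Pre_discretize_values; infer_instance
def pvWitness_discretize_values : List Int × Int := ([3, 1, 2, 2], 2)

def Spec_discretize_values (values : List Int) (bin_num : Int) (out : List Int) : Prop := out = discretize_values_alt values bin_num
instance (values : List Int) (bin_num : Int) (out : List Int) : Decidable (Spec_discretize_values values bin_num out) := by unfold Spec_discretize_values; infer_instance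

-- ===== CLAIM (what is proved, stated in full; the proofs are below) =====
def Claim_equal_discretize_values : Prop := ∀ (values : List Int) (bin_num : Int), Dom_discretize_values values bin_num → Pre_discretize_values values bin_num → Spec_discretize_values values bin_num (discretize_values values bin_num)

-- ===== LEMMAS AND PROOFS =====

-- elementwise order in a (· ≤ ·)-pairwise list
lemma pairwise_le_getElem {l : List Int} (h : l.Pairwise (· ≤ ·)) {i j : Nat}
    (hi : i < l.length) (hj : j < l.length) (hij : i ≤ j) : l[i] ≤ l[j] := by
  rcases Nat.lt_or_ge i j with hlt | hge
  · exact List.pairwise_iff_getElem.mp h i j hi hj hlt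
  · have : i = j := le_antisymm hij hge
    subst this; exact le_refl _

-- the "bracket" position (≤ v below, > v from it on) is unique
lemma bracket_unique (es : List Int) (v : Int) (t t' : Nat)
    (h1 : t ≤ es.length)
    (h2 : ∀ k (hk : k < es.length), k < t → es[k] ≤ v)
    (h3 : ∀ k (hk : k < es.length), t ≤ k → v < es[k])
    (g1 : t' ≤ es.length)
    (g2 : ∀ k (hk : k < es.length), k < t' → es[k] ≤ v)
    (g3 : ∀ k (hk : k < es.length), t' ≤ k → v < es[k]) : t = t' := by
  by_contra hne
  rcases Nat.lt_or_ge t t' with h | h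
  · have hk : t < es.length := lt_of_lt_of_le h g1
    exact absurd (g2 t hk h) (not_le.mpr (h3 t hk le_rfl))
  · have h' : t' < t := lt_of_le_of_ne h (Ne.symm hne)
    have hk : t' < es.length := lt_of_lt_of_le h' h1
    exact absurd (h2 t' hk h') (not_le.mpr (g3 t' hk le_rfl))

-- A's scan on a sorted edge list whose head is ≤ v finds exactly the bracket position, minus one
lemma pvScanA_some (v : Int) :
    ∀ (es : List Int), es.Pairwise (· ≤ ·) →
    (∃ e tl, es = e :: tl ∧ e ≤ v) →
    ∀ (i : Int),
    ∃ t : Nat, 1 ≤ t ∧ t ≤ es.length ∧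
      (∀ k (hk : k < es.length), k < t → es[k] ≤ v) ∧
      (∀ k (hk : k < es.length), t ≤ k → v < es[k]) ∧
      pvScanA es i v = some (i + (t : Int) - 1) := by
  intro es
  induction es with
  | nil => rintro _ ⟨e, tl, h, _⟩ _; cases h
  | cons e tl ih =>
    rintro hpw ⟨e₀, tl₀, heq, hev₀⟩ i
    injection heq with h1 h2
    subst h1; subst h2
    have hev : e ≤ v := hev₀
    cases tl with
    | nil =>
      refine ⟨1, le_refl _, by simp, ?_, ?_, ?_⟩
      · intro k hk _
        interval_cases k
        simpa using hev
      · intro k hk h1k; simp at hk; omega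
      · simp [pvScanA, hev]
    | cons e' rest =>
      by_cases hcond : e ≤ v ∧ v < e'
      · -- first bin matches: t = 1
        have htail : (e' :: rest).Pairwise (· ≤ ·) := hpw.tail
        refine ⟨1, le_refl _, by simp, ?_, ?_, ?_⟩
        · intro k hk hk1
          interval_cases k
          simpa using hev
        · intro k hk h1k
          have hk' : k - 1 < (e' :: rest).length := by simp at hk ⊢; omega
          have : (e :: e' :: rest)[k] = (e' :: rest)[k - 1] := by
            rcases k with _ | k
            · omega
            · simp
          rw [this]
          have : (e' :: rest)[0]'(by simp) ≤ (e' :: rest)[k - 1] :=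
            pairwise_le_getElem htail (by simp) hk' (Nat.zero_le _)
          simp only [List.getElem_cons_zero] at this
          exact lt_of_lt_of_le hcond.2 this
        · simp [pvScanA, hcond]
      · -- e ≤ v and ¬(v < e') force e' ≤ v: recurse
        have he'v : e' ≤ v := by
          rcases not_and_or.mp hcond with h | h
          · exact absurd hev h
          · exact le_of_not_gt h
        obtain ⟨t', ht1, ht2, hbelow, habove, hscan⟩ :=
          ih hpw.tail ⟨e', rest, rfl, he'v⟩ (i + 1)
        refine ⟨t' + 1, by omega, by simp at ht2 ⊢; omega, ?_, ?_, ?_⟩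
        · intro k hk hkt
          rcases k with _ | k
          · simpa using hev
          · have : k < (e' :: rest).length := by simp at hk ⊢; omega
            simpa using hbelow k this (by omega)
        · intro k hk hkt
          rcases k with _ | k
          · omega
          · have : k < (e' :: rest).length := by simp at hk ⊢; omega
            simpa using habove k this (by omega)
        · have : pvScanA (e :: e' :: rest) i v = pvScanA (e' :: rest) (i + 1) v := by
            simp [pvScanA, hcond]
          rw [this, hscan]
          congr 1
          push_cast
          ring

-- A's outer fold appends exactly one rank per value when the scan always succeeds
lemma foldl_scan_eq_map (E : List Int) (g : Int → Int) :
    ∀ (vs acc : List Int), (∀ v ∈ vs, pvScanA E 0 v = some (g v)) →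
    vs.foldl (fun ranks val =>
      match pvScanA E 0 val with
      | some r => ranks ++ [r]
      | none => ranks) acc = acc ++ vs.map g := by
  intro vs
  induction vs with
  | nil => intro acc _; simp
  | cons v vs ih =>
    intro acc h
    have hv := h v (by simp)
    simp only [List.foldl_cons, hv, List.map_cons]
    rw [ih (acc ++ [g v]) (fun w hw => h w (by simp [hw]))]
    simp

-- with no bins the scan never appends
lemma foldl_scan_nil :
    ∀ (vs acc : List Int),
    vs.foldl (fun ranks val =>
      match pvScanA ([] : List Int) 0 val with
      | some r => ranks ++ [r]
      | none => ranks) acc = acc := by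
  intro vs
  induction vs with
  | nil => intro acc; simp
  | cons v vs ih => intro acc; simp only [List.foldl_cons, pvScanA]; exact ih acc

-- the edge at index k of the edge list, and the edge list's order
lemma edges_getElem (values : List Int) (bin_num : Int) (k : Nat)
    (hk : k < ((PySem.List.pyRange 0 bin_num 1).map
      (fun i => PySem.List.pyGetD (PySem.List.sorted values (fun x => x))
        (PySem.Int.floordiv (((PySem.List.sorted values (fun x => x)).length : Int) * i) bin_num) 0)).length) :
    ((PySem.List.pyRange 0 bin_num 1).map
      (fun i => PySem.List.pyGetD (PySem.List.sorted values (fun x => x))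
        (PySem.Int.floordiv (((PySem.List.sorted values (fun x => x)).length : Int) * i) bin_num) 0))[k]
    = PySem.List.pyGetD (PySem.List.sorted values (fun x => x))
        (PySem.Int.floordiv (((PySem.List.sorted values (fun x => x)).length : Int) * k) bin_num) 0 := by
  have hk' : k < (PySem.List.pyRange 0 bin_num 1).length := by simpa using hk
  simp only [List.getElem_map, PySem.List.getElem_pyRange_one 0 bin_num k hk', zero_add]

lemma edge_index_bounds (values : List Int) (bin_num : Int) (hbn : 0 < bin_num)
    (hne : values ≠ []) (k : Nat) (hk : (k : Int) < bin_num) :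
    0 ≤ PySem.Int.floordiv (((PySem.List.sorted values (fun x => x)).length : Int) * k) bin_num ∧
    PySem.Int.floordiv (((PySem.List.sorted values (fun x => x)).length : Int) * k) bin_num
      < ((PySem.List.sorted values (fun x => x)).length : Int) := by
  set n : Int := ((PySem.List.sorted values (fun x => x)).length : Int) with hn
  have hn1 : 1 ≤ n := by
    have := PySem.List.length_sorted values (fun x => x) false
    rcases values with _ | ⟨a, l⟩
    · exact absurd rfl hne
    · simp [hn, this]
  rw [PySem.Int.floordiv_eq_ediv_of_pos hbn]
  constructor
  · exact Int.ediv_nonneg (by positivity) (le_of_lt hbn)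
  · rw [Int.ediv_lt_iff_lt_mul hbn]
    have h1 : (k : Int) ≤ bin_num - 1 := by omega
    nlinarith

lemma edges_pairwise (values : List Int) (bin_num : Int) (hbn : 0 < bin_num) (hne : values ≠ []) :
    ((PySem.List.pyRange 0 bin_num 1).map
      (fun i => PySem.List.pyGetD (PySem.List.sorted values (fun x => x))
        (PySem.Int.floordiv (((PySem.List.sorted values (fun x => x)).length : Int) * i) bin_num) 0)).Pairwise (· ≤ ·) := by
  rw [List.pairwise_iff_getElem]
  intro a b ha hb hab
  rw [edges_getElem values bin_num a ha, edges_getElem values bin_num b hb]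
  have hlen : ∀ k : Nat, k < ((PySem.List.pyRange 0 bin_num 1).map
      (fun i => PySem.List.pyGetD (PySem.List.sorted values (fun x => x))
        (PySem.Int.floordiv (((PySem.List.sorted values (fun x => x)).length : Int) * i) bin_num) 0)).length → (k : Int) < bin_num := by
    intro k hk
    have : k < (PySem.List.pyRange 0 bin_num 1).length := by simpa using hk
    rw [PySem.List.length_pyRange_one] at this
    omega
  have hba := edge_index_bounds values bin_num hbn hne a (hlen a ha)
  have hbb := edge_index_bounds values bin_num hbn hne b (hlen b hb)
  rw [PySem.List.pyGetD_eq_getElem (PySem.List.sorted values (fun x => x)) 0 hba.1 hba.2,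
    PySem.List.pyGetD_eq_getElem (PySem.List.sorted values (fun x => x)) 0 hbb.1 hbb.2]
  have hpw : (PySem.List.sorted values (fun x => x)).Pairwise (· ≤ ·) := by
    simpa using PySem.List.sorted_pairwise values (fun x => x)
  apply pairwise_le_getElem hpw
  have hmono : PySem.Int.floordiv (((PySem.List.sorted values (fun x => x)).length : Int) * a) bin_num
      ≤ PySem.Int.floordiv (((PySem.List.sorted values (fun x => x)).length : Int) * b) bin_num := by
    rw [PySem.Int.floordiv_eq_ediv_of_pos hbn, PySem.Int.floordiv_eq_ediv_of_pos hbn]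
    apply Int.ediv_le_ediv hbn
    have hab' : (a : Int) ≤ (b : Int) := by exact_mod_cast le_of_lt hab
    have hn0 : (0:Int) ≤ ((PySem.List.sorted values (fun x => x)).length : Int) := by positivity
    nlinarith
  have h1 := hba.1
  omega

-- ===== VERDICT (by name: the statement is the Claim_ definition above) =====
theorem discretize_values_spec : Claim_equal_discretize_values := by
  intro values bin_num _hdom hpre
  unfold Spec_discretize_values discretize_values discretize_values_alt
  by_cases hbn : bin_num < 1
  · rw [if_pos hbn]
    simp only []
    rw [PySem.List.pyRange_one_eq_nil (by omega)]
    simp only [List.foldl_nil]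
    exact foldl_scan_nil values []
  · rw [if_neg hbn]
    have hbn' : 0 < bin_num := by omega
    have hne : values ≠ [] := by
      rcases hpre with h | h
      · exact h
      · omega
    simp only []
    set sv := PySem.List.sorted values (fun x => x) with hsv
    set n : Int := (sv.length : Int) with hn
    set f : Int → Int := fun i => PySem.List.pyGetD sv (PySem.Int.floordiv (n * i) bin_num) 0 with hf
    set E := (PySem.List.pyRange 0 bin_num 1).map f with hE
    rw [PySem.List.foldl_append_singleton_eq_map f (PySem.List.pyRange 0 bin_num 1) []]
    rw [List.nil_append]
    -- head of E is the minimum of values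
    have hsvne : sv ≠ [] := by
      have hlen : sv.length = values.length := PySem.List.length_sorted values (fun x => x) false
      intro h
      apply hne
      have : values.length = 0 := by rw [← hlen, h]; rfl
      exact List.eq_nil_of_length_eq_zero this
    obtain ⟨m, svtl, hsveq⟩ := List.exists_cons_of_ne_nil hsvne
    have hEcons : ∃ tl, E = m :: tl := by
      rw [hE, PySem.List.pyRange_one_cons (by omega : (0:Int) < bin_num)]
      refine ⟨(PySem.List.pyRange (0+1) bin_num 1).map f, ?_⟩
      simp only [List.map_cons]
      congr 1
      rw [hf]
      simp only [mul_zero]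
      have : PySem.Int.floordiv 0 bin_num = 0 := by
        rw [PySem.Int.floordiv_eq_ediv_of_pos hbn']
        simp
      rw [this, hsveq]
      exact PySem.List.pyGetD_zero_cons m svtl 0
    obtain ⟨Etl, hEeq⟩ := hEcons
    have hEpw : E.Pairwise (· ≤ ·) := edges_pairwise values bin_num hbn' hne
    have hmin : ∀ v ∈ values, m ≤ v := by
      intro v hv
      have := PySem.List.key_head_sorted_le values (fun x => x) (hsv ▸ hsveq) v hv
      simpa using this
    -- per value: A's scan returns bisect_right - 1
    apply foldl_scan_eq_map
    intro v hv
    obtain ⟨t, ht1, ht2, hbelow, habove, hscan⟩ :=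
      pvScanA_some v E hEpw ⟨m, Etl, hEeq, hmin v hv⟩ 0
    obtain ⟨g1, g2, g3⟩ := PySem.List.bisectRight_spec E v hEpw
    have : t = PySem.List.bisectRight E v :=
      bracket_unique E v t (PySem.List.bisectRight E v) ht2 hbelow habove g1 g2 g3
    rw [hscan, ← this]
    congr 1
    omega
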